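-- pv_equiv track=rewrite | github.com/fasjesus/Algorithm-Design-and-Analysis | Problema 08 - Coloração de Tabuleiro com Restrições/full.py | check_subgrids
-- ===== SOURCE A (Python) =====
-- def check_subgrids(board, n):
--     # Verificar se há subtabuleiros 2x2 com a mesma configuração
--     for i in range(n-1):
--         for j in range(n-1):
--             # Verificar se todos os elementos do subtabuleiro 2x2 são preenchidos
--             if board[i][j] != -1 and board[i][j+1] != -1 and board[i+1][j] != -1 and board[i+1][j+1] != -1:
--                 # Subtabuleiro 2x2 atual
--                 current_subgrid = [
--                     [board[i][j], board[i][j+1]],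
--                     [board[i+1][j], board[i+1][j+1]]
--                 ]
--                 # Comparar com todos os outros subtabuleiros 2x2
--                 for k in range(n-1):
--                     for l in range(n-1):
--                         if (i != k or j != l) and board[k][l] != -1 and board[k][l+1] != -1 and board[k+1][l] != -1 and board[k+1][l+1] != -1:
--                             # Subtabuleiro 2x2 para comparação
--                             compare_subgrid = [
--                                 [board[k][l], board[k][l+1]],
--                                 [board[k+1][l], board[k+1][l+1]]
--                             ]
--                             # Verificar se as configurações são iguais
--                             if current_subgrid == compare_subgrid:
--                                 return False
--     return True
-- ===== SOURCE B (Python) =====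
-- def check_subgrids(board, n):
--     seen = set()
--     for i in range(n - 1):
--         for j in range(n - 1):
--             if board[i][j] != -1 and board[i][j+1] != -1 and board[i+1][j] != -1 and board[i+1][j+1] != -1:
--                 key = (board[i][j], board[i][j+1], board[i+1][j], board[i+1][j+1])
--                 if key in seen:
--                     return False
--                 seen.add(key)
--     return True
-- ===== Notes on version B (the rewrite author's own statement) =====
-- stated objective: alternative
-- what changed: Instead of re-scanning all other 2x2 windows for each window (nested quadruple loop), B makes a single pass over the windows keeping a set of keys already seen and reports a repeat on first membership hit.
-- outside the precondition, e.g. on check_subgrids([[1, 1, 1], [1, 1, 1]], 3): A returns False, B returns False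
import Mathlib
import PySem

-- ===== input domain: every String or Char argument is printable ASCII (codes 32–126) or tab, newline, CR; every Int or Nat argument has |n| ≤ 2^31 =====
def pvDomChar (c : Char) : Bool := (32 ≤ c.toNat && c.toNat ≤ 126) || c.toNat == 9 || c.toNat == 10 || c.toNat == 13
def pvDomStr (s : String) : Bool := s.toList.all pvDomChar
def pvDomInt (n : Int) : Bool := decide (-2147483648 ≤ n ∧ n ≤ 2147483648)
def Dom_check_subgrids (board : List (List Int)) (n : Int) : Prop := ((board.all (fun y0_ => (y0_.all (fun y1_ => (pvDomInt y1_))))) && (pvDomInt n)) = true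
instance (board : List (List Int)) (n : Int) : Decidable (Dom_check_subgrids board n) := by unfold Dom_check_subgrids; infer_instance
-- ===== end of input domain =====

-- B replaces A's per-window rescan of all other 2x2 windows with one pass over the
-- windows keeping a set of already-seen window keys.

-- board[i][j]; total via default, used only in-range under Pre_
def pvCell (board : List (List Int)) (i j : Int) : Int :=
  PySem.List.pyGetD (PySem.List.pyGetD board i []) j 0

-- the four cells of the 2x2 window at (i,j) are all filled (both Pythons test this verbatim)
def pvFull (board : List (List Int)) (i j : Int) : Bool :=
  pvCell board i j != -1 && pvCell board i (j+1) != -1 &&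
  pvCell board (i+1) j != -1 && pvCell board (i+1) (j+1) != -1

-- ===== PORT A =====
-- A's current_subgrid / compare_subgrid nested list
def pvSub (board : List (List Int)) (i j : Int) : List (List Int) :=
  [[pvCell board i j, pvCell board i (j+1)], [pvCell board (i+1) j, pvCell board (i+1) (j+1)]]

def check_subgrids (board : List (List Int)) (n : Int) : Bool :=
  !((PySem.List.pyRange 0 (n-1) 1).any fun i =>
    (PySem.List.pyRange 0 (n-1) 1).any fun j =>
      pvFull board i j &&
      ((PySem.List.pyRange 0 (n-1) 1).any fun k =>
        (PySem.List.pyRange 0 (n-1) 1).any fun l =>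
          (decide (i ≠ k) || decide (j ≠ l)) && pvFull board k l &&
          (pvSub board i j == pvSub board k l)))

-- ===== PORT B =====
-- B's tuple key for the window at (i,j)
def pvKey (board : List (List Int)) (i j : Int) : Int × Int × Int × Int :=
  (pvCell board i j, pvCell board i (j+1), pvCell board (i+1) j, pvCell board (i+1) (j+1))

-- the nested 'for i … for j …' index pairs, in loop order
def pvPositions (n : Int) : List (Int × Int) :=
  (PySem.List.pyRange 0 (n-1) 1).flatMap
    (fun i => (PySem.List.pyRange 0 (n-1) 1).map (fun j => (i, j)))

-- B's loop: early-return False on a repeated key, else extend the seen set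
def pvLoopB (board : List (List Int)) :
    List (Int × Int) → PySem.Set (Int × Int × Int × Int) → Bool
  | [], _ => true
  | (i, j) :: rest, seen =>
    if pvFull board i j then
      if PySem.Set.contains seen (pvKey board i j) then false
      else pvLoopB board rest (PySem.Set.add seen (pvKey board i j))
    else pvLoopB board rest seen

def check_subgrids_alt (board : List (List Int)) (n : Int) : Bool :=
  pvLoopB board (pvPositions n) PySem.Set.empty

-- ===== PRECONDITION & SPEC =====
-- Pre_ requires every cell board[i][j], 0 ≤ i,j < n, to exist: outside this both
-- Pythons raise IndexError, except when an equal window pair happens to be found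
-- before the first out-of-range access (an accident of scan order; both programs
-- behave alike there anyway — see the cite).
def Pre_check_subgrids (board : List (List Int)) (n : Int) : Prop :=
  n ≤ 1 ∨ (n ≤ (board.length : Int) ∧ ∀ row ∈ board.take n.toNat, n ≤ (row.length : Int))
instance (board : List (List Int)) (n : Int) : Decidable (Pre_check_subgrids board n) := by
  unfold Pre_check_subgrids; infer_instance

def pvWitness_check_subgrids : List (List Int) × Int := ([[1, 2], [3, 4]], 2)

def Spec_check_subgrids (board : List (List Int)) (n : Int) (out : Bool) : Prop := out = check_subgrids_alt board n
instance (board : List (List Int)) (n : Int) (out : Bool) : Decidable (Spec_check_subgrids board n out) := by unfold Spec_check_subgrids; infer_instance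

-- ===== CLAIM (what is proved, stated in full; the proofs are below) =====
def Claim_equal_check_subgrids : Prop := ∀ (board : List (List Int)) (n : Int), Dom_check_subgrids board n → Pre_check_subgrids board n → Spec_check_subgrids board n (check_subgrids board n)

-- ===== LEMMAS AND PROOFS =====

-- "some later window repeats an earlier full window's key", by list structure
def pvDup (board : List (List Int)) : List (Int × Int) → Prop
  | [] => False
  | p :: rest =>
      (pvFull board p.1 p.2 = true ∧
        ∃ q ∈ rest, pvFull board q.1 q.2 = true ∧ pvKey board q.1 q.2 = pvKey board p.1 p.2)
      ∨ pvDup board rest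

lemma pvDup_cons (board : List (List Int)) (p : Int × Int) (rest : List (Int × Int)) :
    pvDup board (p :: rest) ↔
      (pvFull board p.1 p.2 = true ∧
        ∃ q ∈ rest, pvFull board q.1 q.2 = true ∧ pvKey board q.1 q.2 = pvKey board p.1 p.2)
      ∨ pvDup board rest := Iff.rfl

-- B's loop returns True iff no processed key is already in `seen` and no key repeats within the list
lemma pvLoopB_char (board : List (List Int)) (L : List (Int × Int)) :
    ∀ seen : PySem.Set (Int × Int × Int × Int),
    pvLoopB board L seen = true ↔
      ((∀ p ∈ L, pvFull board p.1 p.2 = true → pvKey board p.1 p.2 ∉ seen) ∧ ¬ pvDup board L) := by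
  induction L with
  | nil => intro seen; simp [pvLoopB, pvDup]
  | cons p rest ih =>
    intro seen
    obtain ⟨i, j⟩ := p
    by_cases hf : pvFull board i j = true
    · by_cases hm : pvKey board i j ∈ seen
      · have hc : PySem.Set.contains seen (pvKey board i j) = true :=
          (PySem.Set.contains_iff seen _).mpr hm
        simp only [pvLoopB, hf, hc, if_true]
        refine iff_of_false (by simp) ?_
        rintro ⟨h1, _⟩
        exact h1 (i, j) (List.mem_cons_self) hf hm
      · have hc : PySem.Set.contains seen (pvKey board i j) = false := by
          rw [Bool.eq_false_iff]
          intro h; exact hm ((PySem.Set.contains_iff seen _).mp h)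
        simp only [pvLoopB, hf, hc, if_true, Bool.false_eq_true, if_false]
        rw [ih, pvDup_cons]
        constructor
        · rintro ⟨h1, h2⟩
          refine ⟨?_, ?_⟩
          · intro q hq hfq
            rcases List.mem_cons.mp hq with rfl | hq'
            · exact hm
            · exact fun hmem => h1 q hq' hfq ((PySem.Set.mem_add seen _ _).mpr (Or.inl hmem))
          · rintro (⟨_, q, hq, hfq, hkq⟩ | hd)
            · exact h1 q hq hfq ((PySem.Set.mem_add seen _ _).mpr (Or.inr hkq))
            · exact h2 hd
        · rintro ⟨h1, h2⟩
          refine ⟨?_, fun hd => h2 (Or.inr hd)⟩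
          intro q hq hfq hmem
          rcases (PySem.Set.mem_add seen _ _).mp hmem with hmem' | hkey
          · exact h1 q (List.mem_cons_of_mem _ hq) hfq hmem'
          · exact h2 (Or.inl ⟨hf, q, hq, hfq, hkey⟩)
    · have hf' : pvFull board i j = false := Bool.eq_false_iff.mpr hf
      simp only [pvLoopB, hf', Bool.false_eq_true, if_false]
      rw [ih, pvDup_cons]
      constructor
      · rintro ⟨h1, h2⟩
        refine ⟨?_, ?_⟩
        · intro q hq hfq
          rcases List.mem_cons.mp hq with rfl | hq'
          · exact absurd hfq hf
          · exact h1 q hq' hfq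
        · rintro (⟨hfa, _⟩ | hd)
          · exact hf hfa
          · exact h2 hd
      · rintro ⟨h1, h2⟩
        exact ⟨fun q hq => h1 q (List.mem_cons_of_mem _ hq), fun hd => h2 (Or.inr hd)⟩

-- on a duplicate-free position list, pvDup is exactly "two distinct full windows share a key"
lemma pvDup_iff_pair (board : List (List Int)) (L : List (Int × Int)) (hnd : L.Nodup) :
    pvDup board L ↔
      ∃ p ∈ L, ∃ q ∈ L, p ≠ q ∧ pvFull board p.1 p.2 = true ∧ pvFull board q.1 q.2 = true ∧
        pvKey board p.1 p.2 = pvKey board q.1 q.2 := by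
  induction L with
  | nil => simp [pvDup]
  | cons a rest ih =>
    obtain ⟨hna, hnd'⟩ := List.nodup_cons.mp hnd
    rw [pvDup_cons, ih hnd']
    constructor
    · rintro (⟨hfa, q, hq, hfq, hkq⟩ | ⟨p, hp, q, hq, hne, h⟩)
      · exact ⟨a, List.mem_cons_self, q, List.mem_cons_of_mem _ hq,
          fun h => hna (h ▸ hq), hfa, hfq, hkq.symm⟩
      · exact ⟨p, List.mem_cons_of_mem _ hp, q, List.mem_cons_of_mem _ hq, hne, h⟩
    · rintro ⟨p, hp, q, hq, hne, hfp, hfq, hk⟩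
      rcases List.mem_cons.mp hp with rfl | hp' <;> rcases List.mem_cons.mp hq with h0 | hq'
      · exact absurd h0.symm hne
      · exact Or.inl ⟨hfp, q, hq', hfq, hk.symm⟩
      · subst h0; exact Or.inl ⟨hfq, p, hp', hfp, hk⟩
      · exact Or.inr ⟨p, hp', q, hq', hne, hfp, hfq, hk⟩

lemma pvPositions_nodup (n : Int) : (pvPositions n).Nodup := by
  have h := PySem.List.nodup_pyRange_one 0 (n - 1)
  exact List.Nodup.product h h

lemma pvMem_positions (n : Int) (i j : Int) :
    (i, j) ∈ pvPositions n ↔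
      (i ∈ PySem.List.pyRange 0 (n-1) 1 ∧ j ∈ PySem.List.pyRange 0 (n-1) 1) := by
  simp [pvPositions]

lemma pvSub_eq_iff (board : List (List Int)) (i j k l : Int) :
    (pvSub board i j == pvSub board k l) = true ↔ pvKey board i j = pvKey board k l := by
  rw [beq_iff_eq]
  simp only [pvSub, pvKey, List.cons.injEq, Prod.mk.injEq, and_true]
  tauto

-- A returns True iff no two distinct full windows share a key
lemma pvA_char (board : List (List Int)) (n : Int) :
    check_subgrids board n = true ↔
      ¬ ∃ p ∈ pvPositions n, ∃ q ∈ pvPositions n, p ≠ q ∧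
        pvFull board p.1 p.2 = true ∧ pvFull board q.1 q.2 = true ∧
        pvKey board p.1 p.2 = pvKey board q.1 q.2 := by
  unfold check_subgrids
  rw [Bool.not_eq_true', Bool.eq_false_iff, ne_eq]
  apply not_congr
  simp only [List.any_eq_true, Bool.and_eq_true, Bool.or_eq_true, decide_eq_true_eq,
    pvSub_eq_iff]
  constructor
  · rintro ⟨i, hi, j, hj, hf, k, hk, l, hl, ⟨hne, hfq⟩, hkeq⟩
    refine ⟨(i, j), (pvMem_positions n i j).mpr ⟨hi, hj⟩,
            (k, l), (pvMem_positions n k l).mpr ⟨hk, hl⟩, ?_, hf, hfq, hkeq⟩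
    intro h
    obtain ⟨h1, h2⟩ := (Prod.mk.injEq i j k l) ▸ h
    rcases hne with hne | hne
    · exact hne h1
    · exact hne h2
  · rintro ⟨⟨i, j⟩, hp, ⟨k, l⟩, hq, hne, hf, hfq, hkeq⟩
    rw [pvMem_positions] at hp hq
    refine ⟨i, hp.1, j, hp.2, hf, k, hq.1, l, hq.2, ⟨?_, hfq⟩, hkeq⟩
    rcases eq_or_ne i k with rfl | h
    · exact Or.inr (fun hjl => hne (by rw [hjl]))
    · exact Or.inl h

-- ===== VERDICT (by name: the statement is the Claim_ definition above) =====
theorem check_subgrids_spec : Claim_equal_check_subgrids := by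
  intro board n _ _
  unfold Spec_check_subgrids check_subgrids_alt
  rw [Bool.eq_iff_iff, pvA_char, pvLoopB_char,
    pvDup_iff_pair board (pvPositions n) (pvPositions_nodup n)]
  simp [PySem.Set.empty]
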